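-- pv_equiv track=rewrite | github.com/RavindharCYS/Image-Extractor | src/utils/exporters.py | _categorize_metadata
-- ===== SOURCE A (Python) =====
-- from typing import Dict, Any, List, Optional, Union, TextIO, BinaryIO, Tuple
--
-- def _categorize_metadata(metadata: Dict[str, Any]) -> Dict[str, Dict[str, Any]]:
--     """
--     Categorize metadata into logical groups.
--
--     Args:
--         metadata: Dictionary containing metadata
--
--     Returns:
--         Dictionary with categorized metadata
--     """
--     categories = {
--         'Basic Information': {},
--         'Camera Information': {},
--         'Lens Information': {},
--         'Exposure Information': {},
--         'GPS Information': {},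
--         'EXIF Data': {},
--         'IPTC Data': {},
--         'XMP Data': {},
--         'File Information': {},
--         'Other Metadata': {}
--     }
--
--     # Skip these keys as they're handled separately
--     skip_keys = ['PrivacyAssessment']
--
--     for key, value in metadata.items():
--         if key in skip_keys:
--             continue
--
--         # File information
--         if key.startswith('File') or key in ['FileName', 'FilePath', 'FileSize', 'FileSizeFormatted']:
--             categories['File Information'][key] = value
--
--         # Basic information
--         elif key in ['ImageWidth', 'ImageHeight', 'ImageSize', 'Megapixels', 'AspectRatio', 'ColorSpace', 'BitsPerPixel']:
--             categories['Basic Information'][key] = value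
--
--         # Camera information
--         elif key in ['Make', 'Model', 'DeviceMake', 'DeviceModel', 'DeviceType', 'Software', 'CameraSerialNumber', 'DeviceSerialNumber']:
--             categories['Camera Information'][key] = value
--
--         # Lens information
--         elif 'Lens' in key or key in ['FocalLength', 'FocalLength35mm']:
--             categories['Lens Information'][key] = value
--
--         # Exposure information
--         elif key in ['Aperture', 'ShutterSpeed', 'ISO', 'ExposureTime', 'ExposureProgram', 'ExposureMode', 'ExposureCompensation', 'MeteringMode', 'Flash', 'WhiteBalance']:
--             categories['Exposure Information'][key] = value
--
--         # GPS information
--         elif key.startswith('GPS') or key in ['Latitude', 'Longitude', 'Altitude', 'Location', 'LocationName', 'City', 'State', 'Country']: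
--             categories['GPS Information'][key] = value
--
--         # EXIF data
--         elif key.startswith('EXIF:') or key.startswith('EXIF '):
--             categories['EXIF Data'][key] = value
--
--         # IPTC data
--         elif key.startswith('IPTC:') or key.startswith('IPTC '):
--             categories['IPTC Data'][key] = value
--
--         # XMP data
--         elif key.startswith('XMP:') or key.startswith('XMP '):
--             categories['XMP Data'][key] = value
--
--         # Other metadata
--         else:
--             categories['Other Metadata'][key] = value
--
--     # Remove empty categories
--     return {k: v for k, v in categories.items() if v}
-- ===== SOURCE B (Python) =====
-- def _categorize_metadata(metadata):
--     """Categorize metadata into logical groups (rule-table re-implementation)."""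
--     rules = [
--         (lambda k: k.startswith('File') or k in ['FileName', 'FilePath', 'FileSize', 'FileSizeFormatted'], 'File Information'),
--         (lambda k: k in ['ImageWidth', 'ImageHeight', 'ImageSize', 'Megapixels', 'AspectRatio', 'ColorSpace', 'BitsPerPixel'], 'Basic Information'),
--         (lambda k: k in ['Make', 'Model', 'DeviceMake', 'DeviceModel', 'DeviceType', 'Software', 'CameraSerialNumber', 'DeviceSerialNumber'], 'Camera Information'),
--         (lambda k: 'Lens' in k or k in ['FocalLength', 'FocalLength35mm'], 'Lens Information'),
--         (lambda k: k in ['Aperture', 'ShutterSpeed', 'ISO', 'ExposureTime', 'ExposureProgram', 'ExposureMode', 'ExposureCompensation', 'MeteringMode', 'Flash', 'WhiteBalance'], 'Exposure Information'),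
--         (lambda k: k.startswith('GPS') or k in ['Latitude', 'Longitude', 'Altitude', 'Location', 'LocationName', 'City', 'State', 'Country'], 'GPS Information'),
--         (lambda k: k.startswith('EXIF:') or k.startswith('EXIF '), 'EXIF Data'),
--         (lambda k: k.startswith('IPTC:') or k.startswith('IPTC '), 'IPTC Data'),
--         (lambda k: k.startswith('XMP:') or k.startswith('XMP '), 'XMP Data'),
--     ]
--
--     def classify(k):
--         return next((name for pred, name in rules if pred(k)), 'Other Metadata')
--
--     order = ['Basic Information', 'Camera Information', 'Lens Information',
--              'Exposure Information', 'GPS Information', 'EXIF Data', 'IPTC Data',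
--              'XMP Data', 'File Information', 'Other Metadata']
--
--     grouped = {c: {k: v for k, v in metadata.items()
--                    if k != 'PrivacyAssessment' and classify(k) == c}
--                for c in order}
--     return {c: d for c, d in grouped.items() if d}
-- ===== Notes on version B (the rewrite author's own statement) =====
-- stated objective: alternative
-- what changed: Replaces the incremental build (loop over keys with a 10-way if/elif chain mutating per-category dicts, then dropping empties) by a declarative rule table: a classify(key) function that scans an ordered (predicate, category) list for the first match, and a dict comprehension that, for each category in declaration order, collects in one filter pass the pairs classified into it, keeping non-empty groups.
import Mathlib
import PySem

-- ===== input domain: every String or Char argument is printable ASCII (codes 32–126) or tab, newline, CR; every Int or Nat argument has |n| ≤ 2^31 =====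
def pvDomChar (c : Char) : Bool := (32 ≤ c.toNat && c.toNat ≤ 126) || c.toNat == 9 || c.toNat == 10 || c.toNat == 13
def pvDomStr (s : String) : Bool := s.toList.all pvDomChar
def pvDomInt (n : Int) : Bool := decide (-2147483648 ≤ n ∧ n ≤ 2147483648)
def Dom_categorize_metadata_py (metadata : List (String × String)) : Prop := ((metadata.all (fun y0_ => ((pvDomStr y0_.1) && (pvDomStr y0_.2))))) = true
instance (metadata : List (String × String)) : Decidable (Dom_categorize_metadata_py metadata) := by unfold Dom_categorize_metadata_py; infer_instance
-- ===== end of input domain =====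

-- B re-implements A's if/elif categorizer as an ordered rule table (classify-then-group); equal output on every dict input (Pre_ = distinct keys).

-- ===== PORT A =====
-- loop body of A's 'for key, value in metadata.items()' (the if/elif chain; 'continue' = return cats unchanged)
def pvStepA (cats : PySem.Dict String (PySem.Dict String String)) (kv : String × String) :
    PySem.Dict String (PySem.Dict String String) :=
  let key := kv.1
  let value := kv.2
  if ["PrivacyAssessment"].contains key then cats
  else if PySem.Str.startswith key "File" || ["FileName", "FilePath", "FileSize", "FileSizeFormatted"].contains key then
    cats.modify "File Information" PySem.Dict.empty (fun d => d.insert key value)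
  else if ["ImageWidth", "ImageHeight", "ImageSize", "Megapixels", "AspectRatio", "ColorSpace", "BitsPerPixel"].contains key then
    cats.modify "Basic Information" PySem.Dict.empty (fun d => d.insert key value)
  else if ["Make", "Model", "DeviceMake", "DeviceModel", "DeviceType", "Software", "CameraSerialNumber", "DeviceSerialNumber"].contains key then
    cats.modify "Camera Information" PySem.Dict.empty (fun d => d.insert key value)
  else if PySem.Str.isIn "Lens" key || ["FocalLength", "FocalLength35mm"].contains key then
    cats.modify "Lens Information" PySem.Dict.empty (fun d => d.insert key value)
  else if ["Aperture", "ShutterSpeed", "ISO", "ExposureTime", "ExposureProgram", "ExposureMode", "ExposureCompensation", "MeteringMode", "Flash", "WhiteBalance"].contains key then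
    cats.modify "Exposure Information" PySem.Dict.empty (fun d => d.insert key value)
  else if PySem.Str.startswith key "GPS" || ["Latitude", "Longitude", "Altitude", "Location", "LocationName", "City", "State", "Country"].contains key then
    cats.modify "GPS Information" PySem.Dict.empty (fun d => d.insert key value)
  else if PySem.Str.startswith key "EXIF:" || PySem.Str.startswith key "EXIF " then
    cats.modify "EXIF Data" PySem.Dict.empty (fun d => d.insert key value)
  else if PySem.Str.startswith key "IPTC:" || PySem.Str.startswith key "IPTC " then
    cats.modify "IPTC Data" PySem.Dict.empty (fun d => d.insert key value)
  else if PySem.Str.startswith key "XMP:" || PySem.Str.startswith key "XMP " then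
    cats.modify "XMP Data" PySem.Dict.empty (fun d => d.insert key value)
  else
    cats.modify "Other Metadata" PySem.Dict.empty (fun d => d.insert key value)

-- 'categories[name][key] = value' is modify name with default empty: every name is a key of the initial dict, so the default is never used
def categorize_metadata_py (metadata : List (String × String)) : List (String × List (String × String)) :=
  let categories : PySem.Dict String (PySem.Dict String String) := PySem.Dict.ofList
    [("Basic Information", PySem.Dict.empty), ("Camera Information", PySem.Dict.empty),
     ("Lens Information", PySem.Dict.empty), ("Exposure Information", PySem.Dict.empty),
     ("GPS Information", PySem.Dict.empty), ("EXIF Data", PySem.Dict.empty),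
     ("IPTC Data", PySem.Dict.empty), ("XMP Data", PySem.Dict.empty),
     ("File Information", PySem.Dict.empty), ("Other Metadata", PySem.Dict.empty)]
  let categories := metadata.foldl pvStepA categories
  (categories.items.filter (fun kv => !kv.2.items.isEmpty)).map (fun kv => (kv.1, kv.2.items))

-- ===== PORT B =====
def pvRules : List ((String → Bool) × String) :=
  [(fun k => PySem.Str.startswith k "File" || ["FileName", "FilePath", "FileSize", "FileSizeFormatted"].contains k, "File Information"),
   (fun k => ["ImageWidth", "ImageHeight", "ImageSize", "Megapixels", "AspectRatio", "ColorSpace", "BitsPerPixel"].contains k, "Basic Information"),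
   (fun k => ["Make", "Model", "DeviceMake", "DeviceModel", "DeviceType", "Software", "CameraSerialNumber", "DeviceSerialNumber"].contains k, "Camera Information"),
   (fun k => PySem.Str.isIn "Lens" k || ["FocalLength", "FocalLength35mm"].contains k, "Lens Information"),
   (fun k => ["Aperture", "ShutterSpeed", "ISO", "ExposureTime", "ExposureProgram", "ExposureMode", "ExposureCompensation", "MeteringMode", "Flash", "WhiteBalance"].contains k, "Exposure Information"),
   (fun k => PySem.Str.startswith k "GPS" || ["Latitude", "Longitude", "Altitude", "Location", "LocationName", "City", "State", "Country"].contains k, "GPS Information"),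
   (fun k => PySem.Str.startswith k "EXIF:" || PySem.Str.startswith k "EXIF ", "EXIF Data"),
   (fun k => PySem.Str.startswith k "IPTC:" || PySem.Str.startswith k "IPTC ", "IPTC Data"),
   (fun k => PySem.Str.startswith k "XMP:" || PySem.Str.startswith k "XMP ", "XMP Data")]

def pvClassify (k : String) : String :=
  match pvRules.find? (fun r => r.1 k) with
  | some r => r.2
  | none => "Other Metadata"

def categorize_metadata_py_alt (metadata : List (String × String)) : List (String × List (String × String)) :=
  ((["Basic Information", "Camera Information", "Lens Information", "Exposure Information",
     "GPS Information", "EXIF Data", "IPTC Data", "XMP Data", "File Information",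
     "Other Metadata"].map (fun c =>
        (c, metadata.filter (fun kv => kv.1 != "PrivacyAssessment" && pvClassify kv.1 == c)))).filter
    (fun kv => !kv.2.isEmpty))

-- ===== PRECONDITION & SPEC =====
-- Pre_ admits exactly the association lists with pairwise-distinct keys: those are the lists that
-- represent a Python dict (A's argument type); no dict input is excluded.
def Pre_categorize_metadata_py (metadata : List (String × String)) : Prop :=
  (metadata.map Prod.fst).Nodup
instance (metadata : List (String × String)) : Decidable (Pre_categorize_metadata_py metadata) := by
  unfold Pre_categorize_metadata_py; infer_instance

def pvWitness_categorize_metadata_py : (List (String × String)) :=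
  [("FileName", "a.jpg"), ("Make", "X"), ("LensModel", "L"), ("Weird", "w"), ("PrivacyAssessment", "p")]

def Spec_categorize_metadata_py (metadata : List (String × String)) (out : List (String × List (String × String))) : Prop := out = categorize_metadata_py_alt metadata
instance (metadata : List (String × String)) (out : List (String × List (String × String))) : Decidable (Spec_categorize_metadata_py metadata out) := by unfold Spec_categorize_metadata_py; infer_instance

-- ===== CLAIM (what is proved, stated in full; the proofs are below) =====
def Claim_equal_categorize_metadata_py : Prop := ∀ (metadata : List (String × String)), Dom_categorize_metadata_py metadata → Pre_categorize_metadata_py metadata → Spec_categorize_metadata_py metadata (categorize_metadata_py metadata)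

-- ===== LEMMAS AND PROOFS =====

-- B's per-key filter predicate
def pvP (c : String) (kv : String × String) : Bool :=
  kv.1 != "PrivacyAssessment" && pvClassify kv.1 == c

-- the rows of B's grouping, as a function of the processed prefix
def pvBList (l : List (String × String)) : List (String × List (String × String)) :=
  ["Basic Information", "Camera Information", "Lens Information", "Exposure Information",
   "GPS Information", "EXIF Data", "IPTC Data", "XMP Data", "File Information",
   "Other Metadata"].map (fun c => (c, l.filter (pvP c)))

-- A's loop state after the processed prefix, expressed through B's grouping
def pvStateOf (l : List (String × String)) : PySem.Dict String (PySem.Dict String String) :=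
  PySem.Dict.mk ((pvBList l).map (fun r => (r.1, PySem.Dict.mk r.2)))

-- A's if/elif chain is: skip "PrivacyAssessment", else update the category B's classify picks
set_option maxHeartbeats 1600000 in
lemma pvStepA_eq_classify (cats : PySem.Dict String (PySem.Dict String String)) (k v : String) :
    pvStepA cats (k, v) =
      if ["PrivacyAssessment"].contains k then cats
      else cats.modify (pvClassify k) PySem.Dict.empty (fun d => d.insert k v) := by
  rcases Bool.eq_false_or_eq_true (["PrivacyAssessment"].contains k) with hp | hp
  · simp only [pvStepA]
    rw [if_pos hp, if_pos hp]
  · have hp' : ¬ (["PrivacyAssessment"].contains k = true) := by simpa using hp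
    simp only [pvStepA]
    rw [if_neg hp', if_neg hp']
    rcases Bool.eq_false_or_eq_true (PySem.Str.startswith k "File" || ["FileName", "FilePath", "FileSize", "FileSizeFormatted"].contains k) with h1 | h1
    · have hcl : pvClassify k = "File Information" := by
        simp only [pvClassify, pvRules]
        rw [List.find?_cons_of_pos (by simpa using h1)]
      rw [hcl, if_pos h1]
    have h1' : ¬ ((PySem.Str.startswith k "File" || ["FileName", "FilePath", "FileSize", "FileSizeFormatted"].contains k) = true) := by simpa using h1
    rw [if_neg h1']
    rcases Bool.eq_false_or_eq_true (["ImageWidth", "ImageHeight", "ImageSize", "Megapixels", "AspectRatio", "ColorSpace", "BitsPerPixel"].contains k) with h2 | h2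
    · have hcl : pvClassify k = "Basic Information" := by
        simp only [pvClassify, pvRules]
        rw [List.find?_cons_of_neg (by simpa using h1), List.find?_cons_of_pos (by simpa using h2)]
      rw [hcl, if_pos h2]
    have h2' : ¬ ((["ImageWidth", "ImageHeight", "ImageSize", "Megapixels", "AspectRatio", "ColorSpace", "BitsPerPixel"].contains k) = true) := by simpa using h2
    rw [if_neg h2']
    rcases Bool.eq_false_or_eq_true (["Make", "Model", "DeviceMake", "DeviceModel", "DeviceType", "Software", "CameraSerialNumber", "DeviceSerialNumber"].contains k) with h3 | h3
    · have hcl : pvClassify k = "Camera Information" := by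
        simp only [pvClassify, pvRules]
        rw [List.find?_cons_of_neg (by simpa using h1), List.find?_cons_of_neg (by simpa using h2), List.find?_cons_of_pos (by simpa using h3)]
      rw [hcl, if_pos h3]
    have h3' : ¬ ((["Make", "Model", "DeviceMake", "DeviceModel", "DeviceType", "Software", "CameraSerialNumber", "DeviceSerialNumber"].contains k) = true) := by simpa using h3
    rw [if_neg h3']
    rcases Bool.eq_false_or_eq_true (PySem.Str.isIn "Lens" k || ["FocalLength", "FocalLength35mm"].contains k) with h4 | h4
    · have hcl : pvClassify k = "Lens Information" := by
        simp only [pvClassify, pvRules]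
        rw [List.find?_cons_of_neg (by simpa using h1), List.find?_cons_of_neg (by simpa using h2), List.find?_cons_of_neg (by simpa using h3), List.find?_cons_of_pos (by simpa using h4)]
      rw [hcl, if_pos h4]
    have h4' : ¬ ((PySem.Str.isIn "Lens" k || ["FocalLength", "FocalLength35mm"].contains k) = true) := by simpa using h4
    rw [if_neg h4']
    rcases Bool.eq_false_or_eq_true (["Aperture", "ShutterSpeed", "ISO", "ExposureTime", "ExposureProgram", "ExposureMode", "ExposureCompensation", "MeteringMode", "Flash", "WhiteBalance"].contains k) with h5 | h5
    · have hcl : pvClassify k = "Exposure Information" := by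
        simp only [pvClassify, pvRules]
        rw [List.find?_cons_of_neg (by simpa using h1), List.find?_cons_of_neg (by simpa using h2), List.find?_cons_of_neg (by simpa using h3), List.find?_cons_of_neg (by simpa using h4), List.find?_cons_of_pos (by simpa using h5)]
      rw [hcl, if_pos h5]
    have h5' : ¬ ((["Aperture", "ShutterSpeed", "ISO", "ExposureTime", "ExposureProgram", "ExposureMode", "ExposureCompensation", "MeteringMode", "Flash", "WhiteBalance"].contains k) = true) := by simpa using h5
    rw [if_neg h5']
    rcases Bool.eq_false_or_eq_true (PySem.Str.startswith k "GPS" || ["Latitude", "Longitude", "Altitude", "Location", "LocationName", "City", "State", "Country"].contains k) with h6 | h6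
    · have hcl : pvClassify k = "GPS Information" := by
        simp only [pvClassify, pvRules]
        rw [List.find?_cons_of_neg (by simpa using h1), List.find?_cons_of_neg (by simpa using h2), List.find?_cons_of_neg (by simpa using h3), List.find?_cons_of_neg (by simpa using h4), List.find?_cons_of_neg (by simpa using h5), List.find?_cons_of_pos (by simpa using h6)]
      rw [hcl, if_pos h6]
    have h6' : ¬ ((PySem.Str.startswith k "GPS" || ["Latitude", "Longitude", "Altitude", "Location", "LocationName", "City", "State", "Country"].contains k) = true) := by simpa using h6
    rw [if_neg h6']
    rcases Bool.eq_false_or_eq_true (PySem.Str.startswith k "EXIF:" || PySem.Str.startswith k "EXIF ") with h7 | h7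
    · have hcl : pvClassify k = "EXIF Data" := by
        simp only [pvClassify, pvRules]
        rw [List.find?_cons_of_neg (by simpa using h1), List.find?_cons_of_neg (by simpa using h2), List.find?_cons_of_neg (by simpa using h3), List.find?_cons_of_neg (by simpa using h4), List.find?_cons_of_neg (by simpa using h5), List.find?_cons_of_neg (by simpa using h6), List.find?_cons_of_pos (by simpa using h7)]
      rw [hcl, if_pos h7]
    have h7' : ¬ ((PySem.Str.startswith k "EXIF:" || PySem.Str.startswith k "EXIF ") = true) := by simpa using h7
    rw [if_neg h7']
    rcases Bool.eq_false_or_eq_true (PySem.Str.startswith k "IPTC:" || PySem.Str.startswith k "IPTC ") with h8 | h8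
    · have hcl : pvClassify k = "IPTC Data" := by
        simp only [pvClassify, pvRules]
        rw [List.find?_cons_of_neg (by simpa using h1), List.find?_cons_of_neg (by simpa using h2), List.find?_cons_of_neg (by simpa using h3), List.find?_cons_of_neg (by simpa using h4), List.find?_cons_of_neg (by simpa using h5), List.find?_cons_of_neg (by simpa using h6), List.find?_cons_of_neg (by simpa using h7), List.find?_cons_of_pos (by simpa using h8)]
      rw [hcl, if_pos h8]
    have h8' : ¬ ((PySem.Str.startswith k "IPTC:" || PySem.Str.startswith k "IPTC ") = true) := by simpa using h8
    rw [if_neg h8']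
    rcases Bool.eq_false_or_eq_true (PySem.Str.startswith k "XMP:" || PySem.Str.startswith k "XMP ") with h9 | h9
    · have hcl : pvClassify k = "XMP Data" := by
        simp only [pvClassify, pvRules]
        rw [List.find?_cons_of_neg (by simpa using h1), List.find?_cons_of_neg (by simpa using h2), List.find?_cons_of_neg (by simpa using h3), List.find?_cons_of_neg (by simpa using h4), List.find?_cons_of_neg (by simpa using h5), List.find?_cons_of_neg (by simpa using h6), List.find?_cons_of_neg (by simpa using h7), List.find?_cons_of_neg (by simpa using h8), List.find?_cons_of_pos (by simpa using h9)]
      rw [hcl, if_pos h9]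
    have h9' : ¬ ((PySem.Str.startswith k "XMP:" || PySem.Str.startswith k "XMP ") = true) := by simpa using h9
    rw [if_neg h9']
    have hcl : pvClassify k = "Other Metadata" := by
      simp only [pvClassify, pvRules]
      rw [List.find?_cons_of_neg (by simpa using h1), List.find?_cons_of_neg (by simpa using h2), List.find?_cons_of_neg (by simpa using h3), List.find?_cons_of_neg (by simpa using h4), List.find?_cons_of_neg (by simpa using h5), List.find?_cons_of_neg (by simpa using h6), List.find?_cons_of_neg (by simpa using h7), List.find?_cons_of_neg (by simpa using h8), List.find?_cons_of_neg (by simpa using h9)]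
      rfl
    rw [hcl]

lemma pv_classify_mem (k : String) :
    pvClassify k ∈ ["Basic Information", "Camera Information", "Lens Information",
      "Exposure Information", "GPS Information", "EXIF Data", "IPTC Data", "XMP Data",
      "File Information", "Other Metadata"] := by
  unfold pvClassify
  cases h : pvRules.find? (fun r => r.1 k) with
  | none => simp
  | some r =>
    have hr := List.mem_of_find?_eq_some h
    simp only [pvRules] at hr
    fin_cases hr <;> simp

set_option maxHeartbeats 1600000 in
lemma pv_modify_stateOf (l : List (String × String)) (k v : String)
    (hk : ∀ x ∈ l, x.1 ≠ k) (hpriv : k ≠ "PrivacyAssessment") :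
    (pvStateOf l).modify (pvClassify k) PySem.Dict.empty (fun d => d.insert k v)
      = pvStateOf (l ++ [(k, v)]) := by
  have hany : ∀ q : String × String → Bool,
      ((List.filter q l).any fun p => p.1 == k) = false := by
    intro q
    simp only [List.any_eq_false]
    intro p hp
    simpa using hk p (List.mem_of_mem_filter hp)
  have hm := pv_classify_mem k
  simp only [List.mem_cons, List.not_mem_nil, or_false] at hm
  rcases hm with hc | hc | hc | hc | hc | hc | hc | hc | hc | hc <;>
    rw [hc] <;>
    simp [pvStateOf, pvBList, pvP, PySem.Dict.modify, PySem.Dict.getD, PySem.Dict.get?,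
      PySem.Dict.contains, PySem.Dict.insert, List.filter_append, hany, hc, hpriv]

lemma pv_step_eq (processed : List (String × String)) (k v : String)
    (hk : ∀ x ∈ processed, x.1 ≠ k) :
    pvStepA (pvStateOf processed) (k, v) = pvStateOf (processed ++ [(k, v)]) := by
  rw [pvStepA_eq_classify]
  by_cases h0 : k = "PrivacyAssessment"
  · simp [pvStateOf, pvBList, pvP, h0, List.filter_append]
  · rw [if_neg (by simp_all)]
    exact pv_modify_stateOf processed k v hk h0

lemma pv_fold_eq : ∀ (rest processed : List (String × String)),
    ((processed ++ rest).map Prod.fst).Nodup →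
    rest.foldl pvStepA (pvStateOf processed) = pvStateOf (processed ++ rest) := by
  intro rest
  induction rest with
  | nil => intro processed _; simp
  | cons kv rest ih =>
    intro processed h
    have hk : ∀ x ∈ processed, x.1 ≠ kv.1 := by
      rw [List.map_append, List.nodup_append] at h
      intro x hx
      exact h.2.2 x.1 (List.mem_map_of_mem (f := Prod.fst) hx) kv.1 (by simp)
    rw [List.foldl_cons, pv_step_eq processed kv.1 kv.2 hk]
    have h' : (((processed ++ [kv]) ++ rest).map Prod.fst).Nodup := by
      rw [List.append_assoc]; simpa using h
    rw [ih (processed ++ [kv]) h']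
    simp

lemma pv_rows_roundtrip (rows : List (String × List (String × String))) :
    ((rows.map (fun r => (r.1, PySem.Dict.mk r.2))).filter
        (fun kv => !kv.2.items.isEmpty)).map (fun kv => (kv.1, kv.2.items))
      = rows.filter (fun kv => !kv.2.isEmpty) := by
  induction rows with
  | nil => rfl
  | cons r rows ih =>
    by_cases h : r.2.isEmpty <;> simp [h, ih]

lemma pv_init_eq : (PySem.Dict.ofList
    [("Basic Information", PySem.Dict.empty), ("Camera Information", PySem.Dict.empty),
     ("Lens Information", PySem.Dict.empty), ("Exposure Information", PySem.Dict.empty),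
     ("GPS Information", PySem.Dict.empty), ("EXIF Data", PySem.Dict.empty),
     ("IPTC Data", PySem.Dict.empty), ("XMP Data", PySem.Dict.empty),
     ("File Information", PySem.Dict.empty), ("Other Metadata", PySem.Dict.empty)]
      : PySem.Dict String (PySem.Dict String String)) = pvStateOf [] := by rfl

-- ===== VERDICT (by name: the statement is the Claim_ definition above) =====
theorem categorize_metadata_py_spec : Claim_equal_categorize_metadata_py := by
  intro metadata _ hpre
  unfold Spec_categorize_metadata_py
  show (((metadata.foldl pvStepA _).items.filter _).map _) = _
  rw [pv_init_eq, pv_fold_eq metadata [] (by simpa using hpre)]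
  simp only [List.nil_append]
  have hitems : (pvStateOf metadata).items
      = (pvBList metadata).map (fun r => (r.1, PySem.Dict.mk r.2)) := rfl
  rw [hitems, pv_rows_roundtrip]
  rfl
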